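-- pv_equiv track=rewrite | github.com/ctjian/ai_tool_platform | backend/app/custom_tools/arxiv_translate/splitter.py | _join_most
-- ===== SOURCE A (Python) =====
-- def _join_most(translated: str, original: str) -> str:
--     p_t = 0
--     p_o = 0
--
--     def _find_next(source: str, chars: list[str], begin: int):
--         p = begin
--         while p < len(source):
--             if source[p] in chars:
--                 return p, source[p]
--             p += 1
--         return None, None
--
--     while True:
--         res_o, ch = _find_next(original, ["{", "}"], p_o)
--         if res_o is None:
--             break
--         res_t, _ = _find_next(translated, [ch], p_t)
--         if res_t is None:
--             break
--         p_o = res_o + 1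
--         p_t = res_t + 1
--     return translated[:p_t] + original[p_o:]
-- ===== SOURCE B (Python) =====
-- def _join_most(translated: str, original: str) -> str:
--     # One pass over each string to collect ordered brace events, then a
--     # two-pointer greedy walk over the event lists.
--     o_events = [(i, c) for i, c in enumerate(original) if c in "{}"]
--     t_events = [(i, c) for i, c in enumerate(translated) if c in "{}"]
--     j = 0
--     last = None
--     for oi, c in o_events:
--         while j < len(t_events) and t_events[j][1] != c:
--             j += 1
--         if j == len(t_events):
--             break
--         last = (oi, t_events[j][0])
--         j += 1
--     p_o = last[0] + 1 if last is not None else 0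
--     p_t = last[1] + 1 if last is not None else 0
--     return translated[:p_t] + original[p_o:]
-- ===== Notes on version B (the rewrite author's own statement) =====
-- stated objective: alternative
-- what changed: Instead of repeatedly re-scanning the strings character-by-character with a _find_next helper from moving positions, B extracts each string's ordered brace-event list (index, char) in one pass and aligns them with a single two-pointer greedy walk over the event lists, deriving the cut points from the last matched pair.
import Mathlib
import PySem

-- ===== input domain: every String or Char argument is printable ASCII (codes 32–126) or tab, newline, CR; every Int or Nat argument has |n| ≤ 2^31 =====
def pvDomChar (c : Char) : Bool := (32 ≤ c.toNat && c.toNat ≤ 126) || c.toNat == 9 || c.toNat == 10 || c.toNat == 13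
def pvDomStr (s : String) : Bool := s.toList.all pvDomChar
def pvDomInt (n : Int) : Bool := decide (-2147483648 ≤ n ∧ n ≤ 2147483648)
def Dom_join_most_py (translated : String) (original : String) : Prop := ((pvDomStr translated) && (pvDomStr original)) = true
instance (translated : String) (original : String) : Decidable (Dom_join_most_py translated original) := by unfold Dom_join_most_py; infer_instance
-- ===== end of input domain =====

-- B replaces A's repeated in-string pointer scans by one pass extracting ordered brace-event
-- lists from each string and a single two-pointer walk over those lists (objective: alternative).

-- ===== PORT A =====
-- _find_next: while p < len(source): if source[p] in chars: return p, source[p]; p += 1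
def findNextA (s : List Char) (chars : List Char) (p : Nat) : Option (Nat × Char) :=
  if h : p < s.length then
    if s[p] ∈ chars then some (p, s[p]) else findNextA s chars (p + 1)
  else none
termination_by s.length - p

-- bounds of a successful _find_next (needed for the main loop's termination)
theorem findNextA_bounds (s : List Char) (chars : List Char) (p : Nat) (i : Nat) (c : Char)
    (h : findNextA s chars p = some (i, c)) : p ≤ i ∧ i < s.length := by
  fun_induction findNextA s chars p with
  | case1 p hp hin => simp_all; omega
  | case2 p hp hin ih => have := ih h; omega
  | case3 p hp => simp_all

-- the 'while True' loop of _join_most, over the state (p_t, p_o)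
def joinLoopA (translated original : List Char) (pt po : Nat) : Nat × Nat :=
  match ho : findNextA original ['{', '}'] po with
  | none => (pt, po)
  | some (ro, ch) =>
    match findNextA translated [ch] pt with
    | none => (pt, po)
    | some (rt, _) => joinLoopA translated original (rt + 1) (ro + 1)
termination_by original.length - po
decreasing_by
  have := findNextA_bounds original ['{', '}'] po ro ch ho
  omega

-- translated[:p_t] + original[p_o:]  (nonnegative slice bounds: take/drop are exact here)
def join_most_py (translated : String) (original : String) : String :=
  let r := joinLoopA translated.toList original.toList 0 0
  String.mk (translated.toList.take r.1 ++ original.toList.drop r.2)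

-- ===== PORT B =====
def isBraceB (c : Char) : Bool := c == '{' || c == '}'

-- [(i, c) for i, c in enumerate(s) if c in "{}"]
def eventsB (i : Nat) (s : List Char) : List (Nat × Char) :=
  match s with
  | [] => []
  | c :: r => if isBraceB c then (i, c) :: eventsB (i + 1) r else eventsB (i + 1) r

-- the inner 'while ... j += 1' skip-to-match over the translated event list;
-- returns the matched translated index and the remaining events after it
def scanForB (te : List (Nat × Char)) (c : Char) : Option (Nat × List (Nat × Char)) :=
  match te with
  | [] => none
  | (ti, c') :: r => if c' == c then some (ti, r) else scanForB r c

-- the 'for oi, c in o_events' loop carrying the last matched pair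
def goB (oe te : List (Nat × Char)) (last : Option (Nat × Nat)) : Option (Nat × Nat) :=
  match oe with
  | [] => last
  | (oi, c) :: rest =>
    match scanForB te c with
    | none => last
    | some (ti, te') => goB rest te' (some (oi, ti))

-- (p_t, p_o) from the last matched pair (0, 0 if none)
def finalizeB (last : Option (Nat × Nat)) : Nat × Nat :=
  match last with
  | none => (0, 0)
  | some (oi, ti) => (ti + 1, oi + 1)

def join_most_py_alt (translated : String) (original : String) : String :=
  let r := finalizeB (goB (eventsB 0 original.toList) (eventsB 0 translated.toList) none)
  String.mk (translated.toList.take r.1 ++ original.toList.drop r.2)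

-- ===== PRECONDITION & SPEC =====
def Spec_join_most_py (translated : String) (original : String) (out : String) : Prop := out = join_most_py_alt translated original
instance (translated : String) (original : String) (out : String) : Decidable (Spec_join_most_py translated original out) := by unfold Spec_join_most_py; infer_instance

-- ===== CLAIM (what is proved, stated in full; the proofs are below) =====
def Claim_equal_join_most_py : Prop := ∀ (translated : String) (original : String), Dom_join_most_py translated original → Spec_join_most_py translated original (join_most_py translated original)

-- ===== LEMMAS AND PROOFS =====

-- the brace-event list of s restricted to indices ≥ p (proof-only bridge between the two views)
def eFrom (s : List Char) (p : Nat) : List (Nat × Char) :=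
  if h : p < s.length then
    if isBraceB s[p] then (p, s[p]) :: eFrom s (p + 1) else eFrom s (p + 1)
  else []
termination_by s.length - p

theorem eventsB_eq_eFrom (s : List Char) (p : Nat) : eventsB p (s.drop p) = eFrom s p := by
  fun_induction eFrom s p with
  | case1 p hp hb ih =>
    rw [List.drop_eq_getElem_cons hp, eventsB]
    simp [hb, ih]
  | case2 p hp hb ih =>
    rw [List.drop_eq_getElem_cons hp, eventsB]
    simp [hb, ih]
  | case3 p hp =>
    have : s.length ≤ p := by omega
    simp [List.drop_eq_nil_of_le this, eventsB]

theorem eFrom_eq_findNextA (s : List Char) (p : Nat) :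
    eFrom s p = match findNextA s ['{', '}'] p with
                | none => []
                | some (i, c) => (i, c) :: eFrom s (i + 1) := by
  fun_induction eFrom s p with
  | case1 p hp hb ih =>
    have hin : s[p] ∈ ['{', '}'] := by
      simp [isBraceB] at hb
      rcases hb with hb | hb <;> simp [hb]
    rw [findNextA]; simp [hp, hin]
  | case2 p hp hb ih =>
    have hin : s[p] ∉ ['{', '}'] := by
      simp [isBraceB] at hb
      simp [hb.1, hb.2]
    rw [findNextA]; simp [hp, hin, ih]
  | case3 p hp =>
    rw [findNextA]; simp [hp]

theorem findNextA_brace (s : List Char) (p : Nat) (i : Nat) (c : Char)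
    (h : findNextA s ['{', '}'] p = some (i, c)) : isBraceB c = true := by
  fun_induction findNextA s ['{', '}'] p with
  | case1 p hp hin =>
    simp at h
    obtain ⟨h1, h2⟩ := h
    subst h2
    simp at hin
    simp [isBraceB]
    rcases hin with hin | hin <;> simp [hin]
  | case2 p hp hin ih => exact ih h
  | case3 p hp => simp at h

theorem scanForB_eFrom (s : List Char) (p : Nat) (ch : Char) (hb : isBraceB ch = true) :
    scanForB (eFrom s p) ch =
      (findNextA s [ch] p).map (fun ic => (ic.1, eFrom s (ic.1 + 1))) := by
  fun_induction eFrom s p with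
  | case1 p hp hbr ih =>
    rw [findNextA]
    by_cases hc : s[p] = ch
    · simp [scanForB, hp, hc]
    · have hnin : s[p] ∉ [ch] := by simp [hc]
      simp [scanForB, hp, hnin, hc, ih]
  | case2 p hp hbr ih =>
    rw [findNextA]
    have hc : s[p] ≠ ch := by intro e; apply hbr; rw [e]; exact hb
    have hnin : s[p] ∉ [ch] := by simp [hc]
    simp [hp, hnin, ih]
  | case3 p hp =>
    rw [findNextA]
    simp [hp, scanForB]

theorem goB_eq_joinLoopA (t o : List Char) (pt po : Nat) (last : Option (Nat × Nat))
    (hl : finalizeB last = (pt, po)) :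
    finalizeB (goB (eFrom o po) (eFrom t pt) last) = joinLoopA t o pt po := by
  fun_induction joinLoopA t o pt po generalizing last with
  | case1 pt po ho =>
    rw [eFrom_eq_findNextA o po, ho]
    simpa [goB]
  | case2 pt po ro ch ho ht =>
    rw [eFrom_eq_findNextA o po, ho]
    have hbr := findNextA_brace o po ro ch ho
    rw [goB, scanForB_eFrom t pt ch hbr, ht]
    simpa using hl
  | case3 pt po ro ch ho rt c2 ht ih =>
    rw [eFrom_eq_findNextA o po, ho]
    have hbr := findNextA_brace o po ro ch ho
    rw [goB, scanForB_eFrom t pt ch hbr, ht]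
    simp only [Option.map_some]
    exact ih (some (ro, rt)) rfl

-- ===== VERDICT (by name: the statement is the Claim_ definition above) =====
theorem join_most_py_spec : Claim_equal_join_most_py := by
  intro translated original _
  unfold Spec_join_most_py join_most_py join_most_py_alt
  have h0t : eventsB 0 translated.toList = eFrom translated.toList 0 := by
    simpa using eventsB_eq_eFrom translated.toList 0
  have h0o : eventsB 0 original.toList = eFrom original.toList 0 := by
    simpa using eventsB_eq_eFrom original.toList 0
  rw [h0t, h0o,
    goB_eq_joinLoopA translated.toList original.toList 0 0 none (by simp [finalizeB])]
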